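-- pv_equiv track=rewrite | github.com/jeaneudeskacou/Codes | moncsv.py | insensitiveCompare
-- ===== SOURCE A (Python) =====
-- def insensitiveCompare(dic, metafields):
--     """Compare sans tenir compte de la case, 2 listes de string.
--     retourne un dictionnaire forme des couples (dic[i]:metafields[i]) et True pour indiquer que les listes sont
--     les memes sans parler de la case"""
--
--     match = {}
--     unmatch = []
--     for i in dic:
--         find = False
--         for j in metafields:
--             if i.upper() == j.upper():
--                 find = True
--                 match[i] = j
--         if not find:
--             unmatch.append(i)
--     return match, len(unmatch)==0
-- ===== SOURCE B (Python) =====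
-- def insensitiveCompare(dic, metafields):
--     """Compare sans tenir compte de la case, 2 listes de string.
--     retourne un dictionnaire forme des couples (dic[i]:metafields[i]) et True pour indiquer que les listes sont
--     les memes sans parler de la case"""
--
--     idx = {}
--     for j in metafields:
--         idx[j.upper()] = j  # last occurrence wins, as in A's inner scan
--     match = {}
--     ok = True
--     for i in dic:
--         j = idx.get(i.upper())
--         if j is None:
--             ok = False
--         else:
--             match[i] = j
--     return match, ok
-- ===== Notes on version B (the rewrite author's own statement) =====
-- stated objective: faster
-- what changed: Replaced the nested scan (for each dic element, scan all metafields) by a single pass that hashes metafields by their uppercase form (last wins) and then does one dict lookup per dic element.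
import Mathlib
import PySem

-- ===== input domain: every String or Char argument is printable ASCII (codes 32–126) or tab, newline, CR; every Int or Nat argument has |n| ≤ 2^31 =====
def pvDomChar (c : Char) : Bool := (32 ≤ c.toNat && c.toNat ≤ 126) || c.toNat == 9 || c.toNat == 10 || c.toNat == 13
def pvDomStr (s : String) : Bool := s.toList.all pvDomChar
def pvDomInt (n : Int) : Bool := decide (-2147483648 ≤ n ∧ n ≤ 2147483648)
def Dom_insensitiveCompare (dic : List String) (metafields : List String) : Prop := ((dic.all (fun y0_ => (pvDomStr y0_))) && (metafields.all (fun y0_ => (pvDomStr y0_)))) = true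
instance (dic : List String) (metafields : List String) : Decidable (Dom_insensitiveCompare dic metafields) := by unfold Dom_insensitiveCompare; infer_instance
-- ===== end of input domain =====

-- B replaces A's nested O(n*m) scan by hashing metafields by uppercase once and doing one lookup per dic element.

-- ===== PORT A =====
def insensitiveCompare (dic : List String) (metafields : List String) : (List (String × String)) × Bool :=
  let st := dic.foldl (fun (st : PySem.Dict String String × List String) i =>
      let fm := metafields.foldl (fun (p : Bool × PySem.Dict String String) j =>
          if PySem.Str.upper i == PySem.Str.upper j then (true, p.2.insert i j) else p)
        (false, st.1)
      if !fm.1 then (fm.2, st.2 ++ [i]) else (fm.2, st.2))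
    (PySem.Dict.empty, [])
  (st.1.items, st.2.length == 0)

-- ===== PORT B =====
def insensitiveCompare_alt (dic : List String) (metafields : List String) : (List (String × String)) × Bool :=
  let idx := metafields.foldl (fun (d : PySem.Dict String String) j => d.insert (PySem.Str.upper j) j)
    PySem.Dict.empty
  let st := dic.foldl (fun (st : PySem.Dict String String × Bool) i =>
      match idx.get? (PySem.Str.upper i) with
      | none => (st.1, false)
      | some j => (st.1.insert i j, st.2))
    (PySem.Dict.empty, true)
  (st.1.items, st.2)

-- ===== PRECONDITION & SPEC =====
def Spec_insensitiveCompare (dic : List String) (metafields : List String) (out : (List (String × String)) × Bool) : Prop := out = insensitiveCompare_alt dic metafields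
instance (dic : List String) (metafields : List String) (out : (List (String × String)) × Bool) : Decidable (Spec_insensitiveCompare dic metafields out) := by unfold Spec_insensitiveCompare; infer_instance

-- ===== CLAIM (what is proved, stated in full; the proofs are below) =====
def Claim_equal_insensitiveCompare : Prop := ∀ (dic : List String) (metafields : List String), Dom_insensitiveCompare dic metafields → Spec_insensitiveCompare dic metafields (insensitiveCompare dic metafields)

-- ===== LEMMAS AND PROOFS =====

-- last j in ms whose uppercase equals i's uppercase (shared characterisation of both ports)
def pvLastM (i : String) (ms : List String) : Option String :=
  match ms with
  | [] => none
  | j :: t =>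
    match pvLastM i t with
    | some j' => some j'
    | none => if PySem.Str.upper i == PySem.Str.upper j then some j else none

theorem pvInner (i : String) (ms : List String) (b : Bool) (m : PySem.Dict String String) :
    ms.foldl (fun (p : Bool × PySem.Dict String String) j =>
        if PySem.Str.upper i == PySem.Str.upper j then (true, p.2.insert i j) else p) (b, m)
    = (b || ms.any (fun j => PySem.Str.upper i == PySem.Str.upper j),
       match pvLastM i ms with
       | none => m
       | some j => m.insert i j) := by
  induction ms generalizing b m with
  | nil => simp [pvLastM]
  | cons j t ih =>
    simp only [List.foldl_cons, List.any_cons]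
    by_cases h : (PySem.Str.upper i == PySem.Str.upper j) = true
    · rw [if_pos h, ih true (m.insert i j), h]
      show _ = (_, match (match pvLastM i t with
          | some j' => some j'
          | none => if PySem.Str.upper i == PySem.Str.upper j then some j else none) with
        | none => m | some j => m.insert i j)
      cases hl : pvLastM i t with
      | none => simp [h]
      | some j' => simp [PySem.Dict.insert_insert_self]
    · rw [if_neg h, ih b m]
      rw [Bool.not_eq_true] at h
      rw [h]
      show _ = (_, match (match pvLastM i t with
          | some j' => some j'
          | none => if PySem.Str.upper i == PySem.Str.upper j then some j else none) with
        | none => m | some j => m.insert i j)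
      rw [h]
      cases hl : pvLastM i t with
      | none => simp
      | some j' => simp

theorem pvIdx (i : String) (ms : List String) (d : PySem.Dict String String) :
    (ms.foldl (fun (d : PySem.Dict String String) j => d.insert (PySem.Str.upper j) j) d).get?
        (PySem.Str.upper i)
    = match pvLastM i ms with
      | none => d.get? (PySem.Str.upper i)
      | some j => some j := by
  induction ms generalizing d with
  | nil => simp [pvLastM]
  | cons j t ih =>
    rw [List.foldl_cons, ih]
    show _ = match (match pvLastM i t with
        | some j' => some j'
        | none => if PySem.Str.upper i == PySem.Str.upper j then some j else none) with
      | none => d.get? (PySem.Str.upper i) | some j => some j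
    cases hl : pvLastM i t with
    | none =>
      rw [PySem.Dict.get?_insert]
      by_cases h : PySem.Str.upper i = PySem.Str.upper j
      · simp [h]
      · simp [h, beq_iff_eq]
    | some j' => rfl

theorem pvLastM_none_iff (i : String) (ms : List String) :
    pvLastM i ms = none ↔ ms.any (fun j => PySem.Str.upper i == PySem.Str.upper j) = false := by
  induction ms with
  | nil => simp [pvLastM]
  | cons j t ih =>
    simp only [pvLastM, List.any_cons, Bool.or_eq_false_iff]
    cases hl : pvLastM i t with
    | none =>
      by_cases h : (PySem.Str.upper i == PySem.Str.upper j) = true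
      · simp [h]
      · rw [Bool.not_eq_true] at h
        simp [h, ih.mp hl]
    | some j' =>
      constructor
      · intro h; cases h
      · intro ⟨_, ht⟩; rw [ih.mpr ht] at hl; cases hl

theorem pvOuter (metafields : List String) (ds : List String)
    (m : PySem.Dict String String) (u : List String) :
    ds.foldl (fun (st : PySem.Dict String String × Bool) i =>
        match (metafields.foldl (fun (d : PySem.Dict String String) j =>
            d.insert (PySem.Str.upper j) j) PySem.Dict.empty).get? (PySem.Str.upper i) with
        | none => (st.1, false)
        | some j => (st.1.insert i j, st.2)) (m, u.length == 0)
    = ((ds.foldl (fun (st : PySem.Dict String String × List String) i =>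
          let fm := metafields.foldl (fun (p : Bool × PySem.Dict String String) j =>
              if PySem.Str.upper i == PySem.Str.upper j then (true, p.2.insert i j) else p)
            (false, st.1)
          if !fm.1 then (fm.2, st.2 ++ [i]) else (fm.2, st.2)) (m, u)).1,
       ((ds.foldl (fun (st : PySem.Dict String String × List String) i =>
          let fm := metafields.foldl (fun (p : Bool × PySem.Dict String String) j =>
              if PySem.Str.upper i == PySem.Str.upper j then (true, p.2.insert i j) else p)
            (false, st.1)
          if !fm.1 then (fm.2, st.2 ++ [i]) else (fm.2, st.2)) (m, u)).2.length == 0)) := by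
  induction ds generalizing m u with
  | nil => simp
  | cons i t ih =>
    simp only [List.foldl_cons]
    rw [pvIdx i metafields PySem.Dict.empty, PySem.Dict.get?_empty,
        pvInner i metafields false m]
    cases hl : pvLastM i metafields with
    | none =>
      have hfind := (pvLastM_none_iff i metafields).mp hl
      rw [hfind]
      show t.foldl _ (m, false) = _
      have hlen : ((u ++ [i]).length == 0) = false := by simp
      have ih' := ih m (u ++ [i])
      rw [hlen] at ih'
      rw [ih']
      simp
    | some j =>
      have hfind : metafields.any (fun j => PySem.Str.upper i == PySem.Str.upper j) = true := by
        by_contra h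
        rw [(pvLastM_none_iff i metafields).mpr (by simpa using h)] at hl
        cases hl
      rw [hfind]
      show t.foldl _ (m.insert i j, u.length == 0) = _
      rw [ih (m.insert i j) u]
      simp

-- ===== VERDICT (by name: the statement is the Claim_ definition above) =====
theorem insensitiveCompare_spec : Claim_equal_insensitiveCompare := by
  intro dic metafields _
  have h := pvOuter metafields dic PySem.Dict.empty []
  simp only [List.length_nil, Nat.reduceBEq] at h
  simp only [Spec_insensitiveCompare, insensitiveCompare, insensitiveCompare_alt, h]
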